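-- pv_equiv track=rewrite | github.com/gaoxiaobei/LexiLearn | main.py | format_word_bank
-- ===== SOURCE A (Python) =====
-- from typing import Set, List, Tuple, Dict
--
-- def format_word_bank(word_bank_entries: List[str]) -> str:
--     """格式化词汇表"""
--     if not word_bank_entries:
--         return "\n\n==================================================\nWord Bank\n==================================================\n无新词汇"
--     max_word_length = max(len(entry.split(':')[0].strip()) for entry in word_bank_entries)
--     word_bank = "\n\n" + "="*50 + "\n"
--     word_bank += "Word Bank\n"
--     word_bank += "="*50 + "\n\n"
--     for entry in word_bank_entries:
--         word, translation = entry.split(':', 1)  # 防止翻译中包含 ':'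
--         word = word.strip()
--         translation = translation.strip()
--         word_bank += f"{word:<{max_word_length}} : {translation}\n"
--     return word_bank
-- ===== SOURCE B (Python) =====
-- def format_word_bank(word_bank_entries):
--     """格式化词汇表 — one recursive pass that simultaneously computes the column
--     width and a renderer closure; the lines are rendered once the full width is known."""
--     if not word_bank_entries:
--         return "\n\n==================================================\nWord Bank\n==================================================\n无新词汇"
--
--     def rec(entries):
--         # returns (width_so_far, render) where render(final_width) yields the body text
--         if not entries:
--             return 0, lambda W: ""
--         word, translation = entries[0].split(':', 1)
--         word = word.strip()
--         translation = translation.strip()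
--         width, render = rec(entries[1:])
--         return (max(len(word), width),
--                 lambda W: word.ljust(W) + " : " + translation + "\n" + render(W))
--
--     width, render = rec(word_bank_entries)
--     header = "\n\n" + "=" * 50 + "\nWord Bank\n" + "=" * 50 + "\n\n"
--     return header + render(width)
-- ===== Notes on version B (the rewrite author's own statement) =====
-- stated objective: alternative
-- what changed: B replaces A's two independent left-to-right passes (a generator max over split(':') plus a loop that re-splits each entry and appends with +=) by a single structural recursion over the list that parses each entry once and returns both the running maximum width and a renderer closure, which is applied to the final width to produce the body in one shot.
import Mathlib
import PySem

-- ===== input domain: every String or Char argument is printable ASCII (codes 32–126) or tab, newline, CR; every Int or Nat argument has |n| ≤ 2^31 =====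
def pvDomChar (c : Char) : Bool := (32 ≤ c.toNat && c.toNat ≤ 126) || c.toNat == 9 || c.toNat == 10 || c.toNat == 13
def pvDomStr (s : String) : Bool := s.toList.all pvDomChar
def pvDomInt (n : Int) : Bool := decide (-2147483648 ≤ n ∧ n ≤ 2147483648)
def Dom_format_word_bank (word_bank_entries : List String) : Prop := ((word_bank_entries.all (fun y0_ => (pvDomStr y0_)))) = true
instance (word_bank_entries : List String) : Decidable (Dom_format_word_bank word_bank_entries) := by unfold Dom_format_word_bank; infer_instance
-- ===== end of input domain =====

-- B replaces A's two iterative passes by one structural recursion that parses each entry once and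
-- returns both the running max width and a renderer closure applied to the final width; objective:
-- alternative decomposition. Equal return values on all inputs whose entries each contain ':' (Pre_).

-- ===== PORT A =====
-- the empty-input message (identical literal in both Pythons)
def fwbEmptyMsg : String :=
  "\n\n==================================================\nWord Bank\n==================================================\n无新词汇"

-- f"{word:<{n}}" : left-justify with spaces
def fwbPad (w : List Char) (n : Nat) : List Char := w ++ List.replicate (n - w.length) ' '

-- one loop iteration's appended text: entry.split(':', 1) unpacked, both sides stripped, padded line.
-- The `_` arm is where Python raises ValueError (no ':' in the entry) — outside Pre_.
def fwbLineA (maxLen : Nat) (e : String) : List Char :=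
  match PySem.Chars.splitOnMax e.toList [':'] 1 with
  | [w, t] => fwbPad (PySem.Chars.strip w) maxLen ++ " : ".toList ++ PySem.Chars.strip t ++ "\n".toList
  | _ => []

def format_word_bank (word_bank_entries : List String) : String :=
  if word_bank_entries = [] then fwbEmptyMsg
  else
    -- max(len(entry.split(':')[0].strip()) for entry in word_bank_entries)
    let maxLen := (word_bank_entries.map (fun e =>
      (PySem.Chars.strip ((PySem.Chars.splitOn e.toList [':']).headD [])).length)).foldl Nat.max 0
    let header := "\n\n".toList ++ List.replicate 50 '=' ++ "\n".toList ++
      "Word Bank\n".toList ++ List.replicate 50 '=' ++ "\n\n".toList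
    String.ofList (word_bank_entries.foldl (fun acc e => acc ++ fwbLineA maxLen e) header)

-- ===== PORT B =====
-- rec(entries): one structural recursion returning (width_so_far, render); render W is the body text.
-- The `_` arm of the match is Python's ValueError on unpacking (no ':' in the entry) — outside Pre_.
def fwbRecB : List String → Nat × (Nat → List Char)
  | [] => (0, fun _ => [])
  | e :: rest =>
    let p := match PySem.Chars.splitOnMax e.toList [':'] 1 with
      | [w, t] => (PySem.Chars.strip w, PySem.Chars.strip t)
      | _ => ([], [])
    let r := fwbRecB rest
    (Nat.max p.1.length r.1,
     fun W => p.1 ++ List.replicate (W - p.1.length) ' ' ++ " : ".toList ++ p.2 ++ "\n".toList ++ r.2 W)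

def format_word_bank_alt (word_bank_entries : List String) : String :=
  if word_bank_entries = [] then fwbEmptyMsg
  else
    let r := fwbRecB word_bank_entries
    let header := "\n\n".toList ++ List.replicate 50 '=' ++ "\n".toList ++
      "Word Bank\n".toList ++ List.replicate 50 '=' ++ "\n\n".toList
    String.ofList (header ++ r.2 r.1)

-- ===== PRECONDITION & SPEC =====
-- Pre_ excludes inputs with an entry containing no ':' — there Python A raises ValueError on unpacking
-- entry.split(':', 1) (and B raises the same ValueError inside rec).
def Pre_format_word_bank (word_bank_entries : List String) : Prop :=
  (word_bank_entries.all (fun e => e.toList.contains ':')) = true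
instance (word_bank_entries : List String) : Decidable (Pre_format_word_bank word_bank_entries) := by
  unfold Pre_format_word_bank; infer_instance

def pvWitness_format_word_bank : List String := ["apple: fruit", "go :to go", "x:y:z"]

def Spec_format_word_bank (word_bank_entries : List String) (out : String) : Prop :=
  out = format_word_bank_alt word_bank_entries
instance (word_bank_entries : List String) (out : String) : Decidable (Spec_format_word_bank word_bank_entries out) := by
  unfold Spec_format_word_bank; infer_instance

-- ===== CLAIM (what is proved, stated in full; the proofs are below) =====
def Claim_equal_format_word_bank : Prop := ∀ (word_bank_entries : List String), Dom_format_word_bank word_bank_entries → Pre_format_word_bank word_bank_entries → Spec_format_word_bank word_bank_entries (format_word_bank word_bank_entries)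

-- ===== LEMMAS AND PROOFS =====

-- reference splitter for a one-character separator: list of pieces between occurrences of c
def fwbPieces (c : Char) (cs : List Char) : List (List Char) :=
  if h : c ∈ cs then
    cs.takeWhile (· ≠ c) :: fwbPieces c ((cs.dropWhile (· ≠ c)).tail)
  else [cs]
termination_by cs.length
decreasing_by
  have hne : cs.dropWhile (· ≠ c) ≠ [] := by
    intro hnil
    have := (List.dropWhile_eq_nil_iff).mp hnil c h
    simp at this
  have h1 : (cs.dropWhile (· ≠ c)).length ≤ cs.length := List.length_dropWhile_le _ _
  have h2 : ((cs.dropWhile (· ≠ c)).tail).length < (cs.dropWhile (· ≠ c)).length := by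
    cases hcs : cs.dropWhile (· ≠ c) with
    | nil => exact absurd hcs hne
    | cons a t => simp
  omega

theorem fwbPieces_cons_self (c : Char) (rest : List Char) :
    fwbPieces c (c :: rest) = [] :: fwbPieces c rest := by
  rw [fwbPieces]; simp

theorem fwbPieces_cons_ne (c x : Char) (rest : List Char) (hx : x ≠ c) :
    fwbPieces c (x :: rest) = (fwbPieces c rest).modifyHead (x :: ·) := by
  conv_lhs => rw [fwbPieces]
  conv_rhs => rw [fwbPieces]
  by_cases hc : c ∈ rest
  · simp [hc, hx]
  · simp [hc, Ne.symm hx]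

theorem fwbPieces_ne_nil (c : Char) (cs : List Char) : fwbPieces c cs ≠ [] := by
  rw [fwbPieces]; split <;> simp

theorem fwb_go_splitOn (c : Char) :
    ∀ (fuel : Nat) (l cur : List Char) (accl : List (List Char)),
      l.length < fuel →
      PySem.Chars.splitOn.go [c] fuel l cur accl =
        accl.reverse ++ (fwbPieces c l).modifyHead (cur.reverse ++ ·) := by
  intro fuel
  induction fuel with
  | zero => intro l cur accl h; omega
  | succ fuel ih =>
    intro l cur accl h
    cases l with
    | nil => simp [PySem.Chars.splitOn.go, fwbPieces]
    | cons x rest =>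
      by_cases hx : x = c
      · subst hx
        rw [show PySem.Chars.splitOn.go [x] (fuel+1) (x::rest) cur accl
              = PySem.Chars.splitOn.go [x] fuel rest [] (cur.reverse :: accl) by
            simp [PySem.Chars.splitOn.go, List.isPrefixOf]]
        rw [ih rest [] (cur.reverse :: accl) (by simpa using Nat.lt_of_succ_lt_succ h)]
        rw [fwbPieces_cons_self]
        cases hp : fwbPieces x rest <;> simp
      · rw [show PySem.Chars.splitOn.go [c] (fuel+1) (x::rest) cur accl
              = PySem.Chars.splitOn.go [c] fuel rest (x :: cur) accl by
            simp [PySem.Chars.splitOn.go, List.isPrefixOf, Ne.symm hx]]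
        rw [ih rest (x :: cur) accl (by simpa using Nat.lt_of_succ_lt_succ h)]
        rw [fwbPieces_cons_ne c x rest hx]
        cases hp : fwbPieces c rest with
        | nil => exact absurd hp (fwbPieces_ne_nil c rest)
        | cons p ps => simp

theorem fwb_go_max0 (c : Char) :
    ∀ (fuel : Nat) (l cur : List Char) (accl : List (List Char)),
      PySem.Chars.splitOnMax.go [c] fuel 0 l cur accl =
        ((cur.reverse ++ l) :: accl).reverse := by
  intro fuel l cur accl
  cases fuel with
  | zero => simp [PySem.Chars.splitOnMax.go]
  | succ fuel => cases l with
    | nil => simp [PySem.Chars.splitOnMax.go]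
    | cons x rest => simp [PySem.Chars.splitOnMax.go]

theorem fwb_go_max1 (c : Char) :
    ∀ (fuel : Nat) (l cur : List Char) (accl : List (List Char)),
      l.length < fuel →
      PySem.Chars.splitOnMax.go [c] fuel 1 l cur accl =
        accl.reverse ++
          (if c ∈ l then [cur.reverse ++ l.takeWhile (· ≠ c), (l.dropWhile (· ≠ c)).tail]
           else [cur.reverse ++ l]) := by
  intro fuel
  induction fuel with
  | zero => intro l cur accl h; omega
  | succ fuel ih =>
    intro l cur accl h
    cases l with
    | nil => simp [PySem.Chars.splitOnMax.go]
    | cons x rest =>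
      by_cases hx : x = c
      · subst hx
        rw [show PySem.Chars.splitOnMax.go [x] (fuel+1) 1 (x::rest) cur accl
              = PySem.Chars.splitOnMax.go [x] fuel 0 rest [] (cur.reverse :: accl) by
            simp [PySem.Chars.splitOnMax.go, List.isPrefixOf]]
        rw [fwb_go_max0]
        simp
      · rw [show PySem.Chars.splitOnMax.go [c] (fuel+1) 1 (x::rest) cur accl
              = PySem.Chars.splitOnMax.go [c] fuel 1 rest (x :: cur) accl by
            simp [PySem.Chars.splitOnMax.go, List.isPrefixOf, Ne.symm hx]]
        rw [ih rest (x :: cur) accl (by simpa using Nat.lt_of_succ_lt_succ h)]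
        by_cases hc : c ∈ rest
        · simp [hc, hx]
        · simp [hc, Ne.symm hx]

theorem fwb_splitOn_headD (cs : List Char) (c : Char) :
    (PySem.Chars.splitOn cs [c]).headD [] = cs.takeWhile (· ≠ c) := by
  rw [show PySem.Chars.splitOn cs [c] = PySem.Chars.splitOn.go [c] (cs.length + 1) cs [] [] from rfl]
  rw [fwb_go_splitOn c (cs.length + 1) cs [] [] (by omega)]
  rw [fwbPieces]
  by_cases hc : c ∈ cs
  · simp [hc]
  · simp only [hc, dite_false]
    simp only [List.modifyHead, List.headD]
    exact (List.takeWhile_eq_self_iff.mpr (fun x hx => by simp; rintro rfl; exact hc hx)).symm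

theorem fwb_splitOnMax1 (cs : List Char) (c : Char) (h : c ∈ cs) :
    PySem.Chars.splitOnMax cs [c] 1 =
      [cs.takeWhile (· ≠ c), (cs.dropWhile (· ≠ c)).tail] := by
  rw [show PySem.Chars.splitOnMax cs [c] 1
        = PySem.Chars.splitOnMax.go [c] (cs.length + 1) 1 cs [] [] by
      simp [PySem.Chars.splitOnMax]]
  rw [fwb_go_max1 c (cs.length + 1) cs [] [] (by omega)]
  simp [h]

-- the key length A's max pass computes for one entry
def fwbKeyLen (e : String) : Nat :=
  (PySem.Chars.strip ((PySem.Chars.splitOn e.toList [':']).headD [])).length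

-- fold of max from the left equals max of seed with fold from the right
theorem fwb_foldl_max (l : List Nat) : ∀ a, l.foldl Nat.max a = Nat.max a (l.foldr Nat.max 0) := by
  induction l with
  | nil => intro a; simp
  | cons x t ih =>
    intro a
    simp only [List.foldl, List.foldr, ih (Nat.max a x), Nat.max_assoc]

-- characterisation of B's recursion on entries that all contain ':'
theorem fwbRecB_char (es : List String) (h : ∀ e ∈ es, ':' ∈ e.toList) :
    (fwbRecB es).1 = (es.map fwbKeyLen).foldr Nat.max 0 ∧
    ∀ W, (fwbRecB es).2 W = (es.map (fwbLineA W)).flatten := by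
  induction es with
  | nil => exact ⟨rfl, fun W => rfl⟩
  | cons e rest ih =>
    obtain ⟨ih1, ih2⟩ := ih (fun x hx => h x (List.mem_cons_of_mem _ hx))
    have he : ':' ∈ e.toList := h e (List.mem_cons_self)
    have hsplit := fwb_splitOnMax1 e.toList ':' he
    constructor
    · show Nat.max _ _ = _
      simp only [fwbRecB, hsplit, List.map_cons, List.foldr, ← ih1,
        fwbKeyLen, fwb_splitOn_headD]
    · intro W
      show _ ++ _ = _
      simp only [fwbRecB, hsplit, List.map_cons, List.flatten_cons, ← ih2 W]
      simp [fwbLineA, hsplit, fwbPad]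

-- ===== VERDICT (by name: the statement is the Claim_ definition above) =====
theorem format_word_bank_spec : Claim_equal_format_word_bank := by
  intro xs _hdom hpre
  unfold Pre_format_word_bank at hpre
  have hmem : ∀ e ∈ xs, ':' ∈ e.toList := by
    intro e he
    have := List.all_eq_true.mp hpre e he
    simpa using this
  unfold Spec_format_word_bank format_word_bank format_word_bank_alt
  by_cases hnil : xs = []
  · simp [hnil]
  · rw [if_neg hnil, if_neg hnil]
    obtain ⟨h1, h2⟩ := fwbRecB_char xs hmem
    have hw : (xs.map (fun e =>
        (PySem.Chars.strip ((PySem.Chars.splitOn e.toList [':']).headD [])).length)).foldl Nat.max 0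
        = (fwbRecB xs).1 := by
      rw [h1, fwb_foldl_max]
      rfl
    simp only [hw]
    congr 1
    rw [h2, PySem.List.foldl_append_eq_flatMap, List.flatMap_def]
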